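-- pv_equiv track=rewrite | github.com/skillor/proxy | tools/protobuf.py | get_dynamic_wire_format
-- ===== SOURCE A (Python) =====
-- def get_dynamic_wire_format(data, start, end):
--     wire_type = data[start] & 0x7
--     first_byte = data[start]
--     if (first_byte & 0x80) == 0:
--         field_number = (first_byte >> 3)
--         return start + 1, wire_type, field_number
--     else:
--         byte_list = []
--         pos = 0
--         while True:
--             if start + pos >= end:
--                 return None, None, None
--             one_byte = data[start + pos]
--             byte_list.append(one_byte & 0x7F)
--             pos = pos + 1
--             if one_byte & 0x80 == 0x0:
--                 break
--
--         new_start = start + pos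
--
--         index = len(byte_list) - 1
--         field_number = 0
--         while index >= 0:
--             field_number = (field_number << 0x7) + byte_list[index]
--             index = index - 1
--
--         field_number = (field_number >> 3)
--         return new_start, wire_type, field_number
-- ===== SOURCE B (Python) =====
-- def get_dynamic_wire_format(data, start, end):
--     first_byte = data[start]
--     wire_type = first_byte & 0x7
--     if (first_byte & 0x80) == 0:
--         return start + 1, wire_type, first_byte >> 3
--     # single forward pass: accumulate the little-endian base-128 value directly,
--     # no intermediate byte list and no reverse fold
--     value = 0
--     shift = 0
--     pos = 0
--     while True:
--         if start + pos >= end: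
--             return None, None, None
--         b = data[start + pos]
--         value += (b & 0x7F) << shift
--         shift += 7
--         pos += 1
--         if (b & 0x80) == 0:
--             return start + pos, wire_type, value >> 3
-- ===== Notes on version B (the rewrite author's own statement) =====
-- stated objective: simpler
-- what changed: Replaced the two-loop scheme (collect a byte list, then a separate reverse index loop folding it into the value) by a single forward pass that accumulates the value directly with a running shift, so the intermediate list and the second loop disappear.
import Mathlib
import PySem

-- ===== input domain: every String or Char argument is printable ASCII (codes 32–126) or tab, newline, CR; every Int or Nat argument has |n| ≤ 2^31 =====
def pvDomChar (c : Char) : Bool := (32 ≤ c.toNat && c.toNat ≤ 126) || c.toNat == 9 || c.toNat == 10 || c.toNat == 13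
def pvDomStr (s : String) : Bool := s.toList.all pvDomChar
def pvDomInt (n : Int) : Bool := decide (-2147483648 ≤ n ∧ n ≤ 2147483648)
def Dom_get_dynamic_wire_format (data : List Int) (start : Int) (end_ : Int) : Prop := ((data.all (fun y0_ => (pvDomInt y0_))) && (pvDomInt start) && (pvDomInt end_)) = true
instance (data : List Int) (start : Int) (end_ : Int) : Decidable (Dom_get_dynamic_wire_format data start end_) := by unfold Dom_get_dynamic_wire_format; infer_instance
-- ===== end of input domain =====

-- B replaces A's two loops (collect a byte list, then reverse-fold it) by one forward pass
-- accumulating the value with a running shift; same return value everywhere A returns (objective: simpler).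

-- ===== PORT A =====
-- the 'while True' collection loop: returns (new_start, byte_list), or none where Python
-- returns (None, None, None) / raises IndexError (the latter is excluded by Pre_)
def pvA_loop (data : List Int) (start end_ : Int) (pos : Nat) (acc : List Int) : Option (Int × List Int) :=
  if end_ ≤ start + pos then none
  else match PySem.List.pyGet? data (start + pos) with
    | none => none  -- IndexError; outside Pre_
    | some one_byte =>
      let acc := acc ++ [PySem.Int.band one_byte 0x7F]
      if PySem.Int.band one_byte 0x80 == 0 then some (start + pos + 1, acc)
      else pvA_loop data start end_ (pos + 1) acc
termination_by (end_ - start - pos).toNat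
decreasing_by omega

-- the second 'while index >= 0' loop, descending over byte_list
def pvA_fold (byte_list : List Int) (index : Int) (fn : Int) : Int :=
  if 0 ≤ index then
    pvA_fold byte_list (index - 1) ((fn <<< (7:Nat)) + PySem.List.pyGetD byte_list index 0)
  else fn
termination_by (index + 1).toNat
decreasing_by omega

def get_dynamic_wire_format (data : List Int) (start : Int) (end_ : Int) : Option Int × Option Int × Option Int :=
  match PySem.List.pyGet? data start with
  | none => (none, none, none)  -- IndexError; outside Pre_
  | some first_byte =>
    let wire_type := PySem.Int.band first_byte 0x7
    if PySem.Int.band first_byte 0x80 == 0 then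
      (some (start + 1), some wire_type, some (first_byte >>> (3:Nat)))
    else
      match pvA_loop data start end_ 0 [] with
      | none => (none, none, none)
      | some (new_start, byte_list) =>
        (some new_start, some wire_type, some (pvA_fold byte_list ((byte_list.length : Int) - 1) 0 >>> (3:Nat)))

-- ===== PORT B =====
-- B's single forward loop: running value and shift, no intermediate list
def pvB_loop (data : List Int) (start end_ wire_type : Int) (pos : Nat) (value : Int) (shift : Nat) : Option Int × Option Int × Option Int :=
  if end_ ≤ start + pos then (none, none, none)
  else match PySem.List.pyGet? data (start + pos) with
    | none => (none, none, none)  -- IndexError; outside Pre_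
    | some b =>
      let value := value + (PySem.Int.band b 0x7F) <<< shift
      if PySem.Int.band b 0x80 == 0 then (some (start + pos + 1), some wire_type, some (value >>> (3:Nat)))
      else pvB_loop data start end_ wire_type (pos + 1) value (shift + 7)
termination_by (end_ - start - pos).toNat
decreasing_by omega

def get_dynamic_wire_format_alt (data : List Int) (start : Int) (end_ : Int) : Option Int × Option Int × Option Int :=
  match PySem.List.pyGet? data start with
  | none => (none, none, none)  -- IndexError; outside Pre_
  | some first_byte =>
    let wire_type := PySem.Int.band first_byte 0x7
    if PySem.Int.band first_byte 0x80 == 0 then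
      (some (start + 1), some wire_type, some (first_byte >>> (3:Nat)))
    else
      pvB_loop data start end_ wire_type 0 0 0

-- ===== PRECONDITION & SPEC =====
-- Pre_ excludes exactly the inputs where A raises IndexError: an invalid start index, or a
-- continuation-byte scan that reaches an invalid index before end_ or a terminating byte.
def Pre_get_dynamic_wire_format (data : List Int) (start : Int) (end_ : Int) : Prop :=
  PySem.Raise.InRange data.length start ∧
  (PySem.Int.band (PySem.List.pyGetD data start 0) 0x80 ≠ 0 →
    ∀ k ∈ List.range (end_ - start).toNat,
      (∀ j ∈ List.range k, PySem.Int.band (PySem.List.pyGetD data (start + j) 0) 0x80 ≠ 0) →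
      PySem.Raise.InRange data.length (start + k))
instance (data : List Int) (start : Int) (end_ : Int) : Decidable (Pre_get_dynamic_wire_format data start end_) := by unfold Pre_get_dynamic_wire_format; infer_instance

def pvWitness_get_dynamic_wire_format : List Int × Int × Int := ([8], 0, 1)

def Spec_get_dynamic_wire_format (data : List Int) (start : Int) (end_ : Int) (out : Option Int × Option Int × Option Int) : Prop := out = get_dynamic_wire_format_alt data start end_
instance (data : List Int) (start : Int) (end_ : Int) (out : Option Int × Option Int × Option Int) : Decidable (Spec_get_dynamic_wire_format data start end_ out) := by unfold Spec_get_dynamic_wire_format; infer_instance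

-- ===== CLAIM (what is proved, stated in full; the proofs are below) =====
def Claim_equal_get_dynamic_wire_format : Prop := ∀ (data : List Int) (start : Int) (end_ : Int), Dom_get_dynamic_wire_format data start end_ → Pre_get_dynamic_wire_format data start end_ → Spec_get_dynamic_wire_format data start end_ (get_dynamic_wire_format data start end_)

-- ===== LEMMAS AND PROOFS =====

-- little-endian base-128 value of a byte list (proof-side characterisation of both loops)
def pvVal : List Int → Int
  | [] => 0
  | b :: rest => b + (pvVal rest) <<< (7:Nat)

theorem pvVal_append_singleton (l : List Int) (x : Int) :
    pvVal (l ++ [x]) = pvVal l + x <<< (7 * l.length) := by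
  induction l with
  | nil => simp [pvVal, Int.shiftLeft_eq]
  | cons a l ih =>
    simp only [pvVal, ih, List.cons_append, List.length_cons, Int.shiftLeft_eq,
      Nat.mul_succ, pow_add]
    ring

theorem pvA_fold_append (l : List Int) (x : Int) (index : Int) (fn : Int)
    (h : index ≤ (l.length : Int) - 1) :
    pvA_fold (l ++ [x]) index fn = pvA_fold l index fn := by
  by_cases h0 : 0 ≤ index
  · have hget : PySem.List.pyGetD (l ++ [x]) index 0 = PySem.List.pyGetD l index 0 := by
      have hlt : index.toNat < l.length := by omega
      have h1 : PySem.List.pyGet? (l ++ [x]) index = l[index.toNat]? := by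
        rw [PySem.List.pyGet?_of_nonneg _ h0, List.getElem?_append_left hlt]
      have h2 : PySem.List.pyGet? l index = l[index.toNat]? :=
        PySem.List.pyGet?_of_nonneg _ h0
      simp [PySem.List.pyGetD, h1, h2]
    conv_lhs => rw [pvA_fold]
    conv_rhs => rw [pvA_fold]
    rw [if_pos h0, if_pos h0, hget]
    exact pvA_fold_append l x (index - 1) _ (by omega)
  · conv_lhs => rw [pvA_fold]
    conv_rhs => rw [pvA_fold]
    rw [if_neg h0, if_neg h0]
termination_by (index + 1).toNat
decreasing_by omega

theorem pvA_fold_spec (l : List Int) (fn : Int) :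
    pvA_fold l ((l.length : Int) - 1) fn = fn <<< (7 * l.length) + pvVal l := by
  induction l using List.reverseRecOn generalizing fn with
  | nil => rw [pvA_fold]; simp [pvVal]
  | append_singleton l x ih =>
    have hlen : ((l ++ [x]).length : Int) - 1 = (l.length : Int) := by simp
    have hget : PySem.List.pyGetD (l ++ [x]) (l.length : Int) 0 = x := by
      simp [PySem.List.pyGetD, PySem.List.pyGet?_append_length]
    rw [pvA_fold, hlen, if_pos (by omega), hget,
      pvA_fold_append l x ((l.length : Int) - 1) _ (by omega), ih,
      pvVal_append_singleton]
    simp only [Int.shiftLeft_eq, List.length_append, List.length_singleton,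
      Nat.mul_add, Nat.mul_one, pow_add]
    ring

-- the two loops agree: B's running (value, shift) tracks the value of A's collected list
theorem pvLoop_agree (data : List Int) (start end_ wt : Int) (pos : Nat) (acc : List Int) :
    pvB_loop data start end_ wt pos (pvVal acc) (7 * acc.length) =
      (match pvA_loop data start end_ pos acc with
       | none => (none, none, none)
       | some (ns, bl) => (some ns, some wt, some (pvVal bl >>> (3:Nat)))) := by
  rw [pvA_loop, pvB_loop]
  by_cases hend : end_ ≤ start + pos
  · simp [hend]
  · rw [if_neg hend, if_neg hend]
    cases hget : PySem.List.pyGet? data (start + pos) with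
    | none => simp
    | some b =>
      simp only []
      have hval : pvVal acc + (PySem.Int.band b 0x7F) <<< (7 * acc.length)
          = pvVal (acc ++ [PySem.Int.band b 0x7F]) := (pvVal_append_singleton _ _).symm
      by_cases hb : PySem.Int.band b 0x80 == 0
      · simp only [hb, if_true, hval]
      · simp only [hb, if_false]
        have h7 : 7 * acc.length + 7 = 7 * (acc ++ [PySem.Int.band b 0x7F]).length := by
          simp; ring
        rw [hval, h7]
        exact pvLoop_agree data start end_ wt (pos + 1) (acc ++ [PySem.Int.band b 0x7F])
termination_by (end_ - start - pos).toNat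
decreasing_by omega

-- ===== VERDICT (by name: the statement is the Claim_ definition above) =====
theorem get_dynamic_wire_format_spec : Claim_equal_get_dynamic_wire_format := by
  intro data start end_ _ _
  unfold Spec_get_dynamic_wire_format get_dynamic_wire_format get_dynamic_wire_format_alt
  cases hget : PySem.List.pyGet? data start with
  | none => rfl
  | some first_byte =>
    simp only []
    by_cases hb : PySem.Int.band first_byte 0x80 == 0
    · simp [hb]
    · simp only [hb, if_false]
      have := pvLoop_agree data start end_ (PySem.Int.band first_byte 0x7) 0 []
      simp only [pvVal, List.length_nil, Nat.mul_zero] at this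
      rw [this]
      cases hl : pvA_loop data start end_ 0 [] with
      | none => rfl
      | some p =>
        obtain ⟨ns, bl⟩ := p
        simp [pvA_fold_spec, pvVal, Int.shiftLeft_eq]
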